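-- pv_equiv track=rewrite | github.com/fu-gle/server | toondere/RecommendationSystem/ToonsfromSimilars.py | maxSimilarIndex
-- ===== SOURCE A (Python) =====
-- import copy
--
-- def maxSimilarIndex(valueList, N):
--     '''
--     # valueList : [유사도, ...]
--     # N : 뽑을 유사한 사용자의 수
--     '''
--     tempList = copy.deepcopy(valueList)  # 리스트 전체를 깊은 복사해오는 임시 리스트
--     indices = []  # [valueList에서 순서대로 큰 값의 위치] (내림차순)
--     for i in range(N):
--         maxSim = max(tempList)
--         if maxSim < 200000:
--             indices.append(-1)  #여기서는 유사한 사용자 없음 처리만 함.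
--             return indices
--
--         maxIndex = valueList.index(maxSim)
--         tempList[maxIndex] = 0  # 다음 최고값을 찾을 수 있도록
--         indices.append(maxIndex)
--
--     del tempList
--     return indices  # 최고 유사한 사용자들의 인덱스들 반환
-- ===== SOURCE B (Python) =====
-- def maxSimilarIndex(valueList, N):
--     # argsort once: indices sorted by similarity, highest first
--     order = sorted(range(len(valueList)), key=lambda i: valueList[i], reverse=True)
--     indices = []
--     for k in range(N):
--         if k >= len(order) or valueList[order[k]] < 200000:
--             indices.append(-1)
--             return indices
--         indices.append(order[k])
--     return indices
-- ===== Notes on version B (the rewrite author's own statement) =====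
-- stated objective: faster
-- what changed: Instead of N rounds of max()+index() over the whole list with in-place zeroing, B argsorts the indices by similarity once and reads off the top-N indices in a single scan.
-- intended difference: On inputs where some value v >= 200000 occurs at least twice and fewer than N-1 distinct values exceed it, A fills every remaining slot with the first index of v (valueList.index(maxSim) keeps finding the occurrence it already zeroed), while B returns the distinct indices of the top-N values, which is the intended 'indices of the N most similar users'. — e.g. on maxSimilarIndex([300000, 300000], 2): A returns [0, 0], B returns [0, 1]
import Mathlib
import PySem

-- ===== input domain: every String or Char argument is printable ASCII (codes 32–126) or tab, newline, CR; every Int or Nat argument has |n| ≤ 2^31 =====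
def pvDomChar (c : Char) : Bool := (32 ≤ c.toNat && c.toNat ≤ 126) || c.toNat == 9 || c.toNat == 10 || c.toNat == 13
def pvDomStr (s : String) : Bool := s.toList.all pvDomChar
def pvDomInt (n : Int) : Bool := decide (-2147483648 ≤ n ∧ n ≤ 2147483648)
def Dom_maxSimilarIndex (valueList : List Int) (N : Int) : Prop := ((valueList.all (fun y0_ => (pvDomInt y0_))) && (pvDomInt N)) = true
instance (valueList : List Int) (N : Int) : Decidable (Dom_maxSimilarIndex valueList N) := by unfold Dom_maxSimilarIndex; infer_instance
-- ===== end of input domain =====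

-- B replaces A's N rounds of max()+index() with one argsort of the indices by similarity
-- followed by a single scan (objective: faster).

-- ===== PORT A =====
-- the 'for i in range(N)' loop of A, as structural recursion on the number of remaining
-- iterations (range(N) performs N.toNat iterations; the loop variable i is unused)
def maxSimilarIndexLoop (valueList : List Int) (temp : List Int) : Nat → List Int
  | 0 => []
  | fuel + 1 =>
    match PySem.List.max? temp (fun y => y) with
    | none => []                          -- Python: max([]) raises ValueError; excluded by Pre_
    | some maxSim =>
      if maxSim < 200000 then [-1]
      else
        match PySem.List.index? valueList maxSim with
        | none => []                      -- unreachable: maxSim ≥ 200000 is an element of valueList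
        | some maxIndex =>
          -- tempList[maxIndex] = 0 : maxIndex is a nonnegative in-range index from .index()
          (maxIndex : Int) :: maxSimilarIndexLoop valueList (temp.set maxIndex 0) fuel

def maxSimilarIndex (valueList : List Int) (N : Int) : List Int :=
  maxSimilarIndexLoop valueList valueList N.toNat

-- ===== PORT B =====
-- B's 'for k in range(N)' loop: k is the next position in order; fuel = remaining iterations
def maxSimilarIndexAltLoop (valueList order : List Int) : Nat → Nat → List Int
  | _, 0 => []
  | k, fuel + 1 =>
    if order.length ≤ k ∨ PySem.List.pyGetD valueList (PySem.List.pyGetD order (k : Int) 0) 0 < 200000 then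
      [-1]
    else
      PySem.List.pyGetD order (k : Int) 0 ::
        maxSimilarIndexAltLoop valueList order (k + 1) fuel

def maxSimilarIndex_alt (valueList : List Int) (N : Int) : List Int :=
  let order := PySem.List.sorted (PySem.List.pyRange 0 valueList.length 1)
      (fun i => PySem.List.pyGetD valueList i 0) true
  maxSimilarIndexAltLoop valueList order 0 N.toNat

-- ===== PRECONDITION & SPEC =====
-- Pre_ excludes only the inputs where A raises: an empty valueList with N ≥ 1 (max([]) is a ValueError).
def Pre_maxSimilarIndex (valueList : List Int) (N : Int) : Prop := ¬(valueList = [] ∧ 1 ≤ N)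
instance (valueList : List Int) (N : Int) : Decidable (Pre_maxSimilarIndex valueList N) := by
  unfold Pre_maxSimilarIndex; infer_instance

def pvWitness_maxSimilarIndex : List Int × Int := ([300000, 5, 200001], 2)

-- On inputs where some value v ≥ 200000 occurs at least twice and fewer than N-1 distinct values
-- exceed it, A fills every remaining slot with the first index of v (valueList.index(maxSim) keeps
-- finding the occurrence it already zeroed), while B returns the distinct indices of the top-N
-- values, which is the intended 'indices of the N most similar users'.
def D_maxSimilarIndex (valueList : List Int) (N : Int) : Prop :=
  ∃ v ∈ valueList, 200000 ≤ v ∧ 2 ≤ valueList.count v ∧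
    (((PySem.List.dedup valueList).filter (fun w => decide (v < w))).length : Int) + 2 ≤ N
instance (valueList : List Int) (N : Int) : Decidable (D_maxSimilarIndex valueList N) := by
  unfold D_maxSimilarIndex; infer_instance

def Spec_maxSimilarIndex (valueList : List Int) (N : Int) (out : List Int) : Prop :=
  ¬ D_maxSimilarIndex valueList N → out = maxSimilarIndex_alt valueList N
instance (valueList : List Int) (N : Int) (out : List Int) : Decidable (Spec_maxSimilarIndex valueList N out) := by
  unfold Spec_maxSimilarIndex; infer_instance

def pvDiffWitness_maxSimilarIndex : List Int × Int := ([300000, 300000], 2)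
def pvDiffWitnessOut_maxSimilarIndex : (List Int) × (List Int) := ([0, 0], [0, 1])

-- ===== CLAIM (what is proved, stated in full; the proofs are below) =====
def Claim_unchanged_maxSimilarIndex : Prop := ∀ (valueList : List Int) (N : Int), Dom_maxSimilarIndex valueList N → Pre_maxSimilarIndex valueList N → Spec_maxSimilarIndex valueList N (maxSimilarIndex valueList N)
def Claim_changed_maxSimilarIndex : Prop := Dom_maxSimilarIndex (pvDiffWitness_maxSimilarIndex.1) (pvDiffWitness_maxSimilarIndex.2) ∧ Pre_maxSimilarIndex (pvDiffWitness_maxSimilarIndex.1) (pvDiffWitness_maxSimilarIndex.2) ∧ D_maxSimilarIndex (pvDiffWitness_maxSimilarIndex.1) (pvDiffWitness_maxSimilarIndex.2) ∧ maxSimilarIndex (pvDiffWitness_maxSimilarIndex.1) (pvDiffWitness_maxSimilarIndex.2) = pvDiffWitnessOut_maxSimilarIndex.1 ∧ maxSimilarIndex_alt (pvDiffWitness_maxSimilarIndex.1) (pvDiffWitness_maxSimilarIndex.2) = pvDiffWitnessOut_maxSimilarIndex.2 ∧ pvDiffWitnessOut_maxSimilarIndex.1 ≠ pvDiffWitnessO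ut_maxSimilarIndex.2

def Claim_exact_maxSimilarIndex : Prop := ∀ (valueList : List Int) (N : Int), Dom_maxSimilarIndex valueList N → Pre_maxSimilarIndex valueList N → D_maxSimilarIndex valueList N → maxSimilarIndex valueList N ≠ maxSimilarIndex_alt valueList N

-- ===== LEMMAS AND PROOFS =====

-- the similarity of index i, as B's sort key reads it
def pvVal (valueList : List Int) (i : Int) : Int := PySem.List.pyGetD valueList i 0

-- strict order in which B's stable reverse sort lays out two indices
def pvR (valueList : List Int) (a b : Int) : Prop :=
  pvVal valueList b < pvVal valueList a ∨ (pvVal valueList a = pvVal valueList b ∧ a < b)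

-- A's temp list after the positions NOT in s have been zeroed (s = remaining order suffix)
def pvMask (s : List Int) (off : Nat) : List Int → List Int
  | [] => []
  | x :: xs => (if (off : Int) ∈ s then x else 0) :: pvMask s (off + 1) xs

-- B's scan, rephrased on the remaining suffix s of order (fuel = remaining range(N) steps)
def pvBFrom (valueList : List Int) : List Int → Nat → List Int
  | _, 0 => []
  | [], _ + 1 => [-1]
  | i :: s', fuel + 1 =>
    if pvVal valueList i < 200000 then [-1]
    else i :: pvBFrom valueList s' fuel

lemma insertBy_pairwise_pvR (valueList : List Int) (x : Int) :
    ∀ acc : List Int, acc.Pairwise (pvR valueList) → (∀ a ∈ acc, a < x) →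
    (PySem.List.insertBy (fun a b => decide (pvVal valueList b < pvVal valueList a)) x acc).Pairwise (pvR valueList) := by
  intro acc
  induction acc with
  | nil => intro _ _; simp [PySem.List.insertBy, List.pairwise_cons]
  | cons y ys ih =>
    intro hp ha
    simp only [PySem.List.insertBy]
    by_cases hxy : pvVal valueList y < pvVal valueList x
    · rw [if_pos (by simpa using hxy)]
      refine List.pairwise_cons.2 ⟨?_, hp⟩
      intro z hz
      rcases List.mem_cons.1 hz with rfl | hz'
      · exact Or.inl hxy
      · rcases (List.pairwise_cons.1 hp).1 z hz' with h | ⟨he, _⟩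
        · exact Or.inl (lt_trans h hxy)
        · exact Or.inl (he ▸ hxy)
    · rw [if_neg (by simpa using hxy)]
      refine List.pairwise_cons.2 ⟨?_, ih (List.pairwise_cons.1 hp).2
        (fun a haa => ha a (List.mem_cons_of_mem _ haa))⟩
      intro z hz
      rcases (PySem.List.mem_insertBy _ x z ys).1 hz with rfl | hz'
      · rcases lt_or_eq_of_le (not_lt.1 hxy) with h | h
        · exact Or.inl h
        · exact Or.inr ⟨h.symm, ha y List.mem_cons_self⟩
      · exact (List.pairwise_cons.1 hp).1 z hz'

lemma sorted_rev_pairwise_pvR (valueList : List Int) (xs : List Int) (h : xs.Pairwise (· < ·)) :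
    (PySem.List.sorted xs (fun i => PySem.List.pyGetD valueList i 0) true).Pairwise (pvR valueList) := by
  rw [PySem.List.sorted_rev_eq_foldl_insertBy]
  suffices H : ∀ (xs acc : List Int), xs.Pairwise (· < ·) → acc.Pairwise (pvR valueList) →
      (∀ a ∈ acc, ∀ b ∈ xs, a < b) →
      (xs.foldl (fun acc x => PySem.List.insertBy
        (fun a b => decide (PySem.List.pyGetD valueList b 0 < PySem.List.pyGetD valueList a 0)) x acc) acc).Pairwise
        (pvR valueList) by
    exact H xs [] h List.Pairwise.nil (by simp)
  intro xs
  induction xs with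
  | nil => intro acc _ hacc _; exact hacc
  | cons x xs' ih =>
    intro acc hxs hacc hmem
    simp only [List.foldl_cons]
    refine ih _ (List.pairwise_cons.1 hxs).2
      (insertBy_pairwise_pvR valueList x acc hacc (fun a haa => hmem a haa x List.mem_cons_self)) ?_
    intro a haa b hb
    rcases (PySem.List.mem_insertBy _ x a acc).1 haa with rfl | ha'
    · exact (List.pairwise_cons.1 hxs).1 b hb
    · exact hmem a ha' b (List.mem_cons_of_mem _ hb)

lemma length_pvMask (s : List Int) : ∀ (off : Nat) (l : List Int), (pvMask s off l).length = l.length := by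
  intro off l
  induction l generalizing off with
  | nil => rfl
  | cons x xs ih => simp [pvMask, ih]

lemma getElem_pvMask (s : List Int) : ∀ (off : Nat) (l : List Int) (k : Nat) (hk : k < (pvMask s off l).length),
    (pvMask s off l)[k] = if ((off + k : Nat) : Int) ∈ s then l[k]'(by rw [← length_pvMask s off]; exact hk) else 0 := by
  intro off l
  induction l generalizing off with
  | nil => intro k hk; simp [pvMask] at hk
  | cons x xs ih =>
    intro k hk
    cases k with
    | zero => simp [pvMask]
    | succ n =>
      have := ih (off + 1) n (by simpa [pvMask, length_pvMask] using hk)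
      simp only [pvMask, List.getElem_cons_succ]
      rw [this]
      congr 2
      omega

lemma mem_pvMask (s : List Int) (l : List Int) (y : Int) (hy : y ∈ pvMask s 0 l) :
    y = 0 ∨ ∃ (k : Nat) (hk : k < l.length), ((k : Int) ∈ s ∧ y = l[k]) := by
  obtain ⟨k, hk, hky⟩ := List.mem_iff_getElem.1 hy
  have hkl : k < l.length := by rwa [length_pvMask] at hk
  rw [getElem_pvMask s 0 l k hk] at hky
  by_cases hm : ((0 + k : Nat) : Int) ∈ s
  · rw [if_pos hm] at hky
    exact Or.inr ⟨k, hkl, by simpa using hm, hky.symm⟩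
  · rw [if_neg hm] at hky
    exact Or.inl hky.symm

lemma pvMask_eq_self (s : List Int) : ∀ (off : Nat) (l : List Int),
    (∀ j : Nat, off ≤ j → j < off + l.length → (j : Int) ∈ s) → pvMask s off l = l := by
  intro off l
  induction l generalizing off with
  | nil => intro _; rfl
  | cons x xs ih =>
    intro h
    simp only [pvMask]
    rw [if_pos (h off le_rfl (by simp only [List.length_cons]; omega)),
      ih (off + 1) (fun j h1 h2 => h j (by omega) (by simp only [List.length_cons]; omega))]

lemma pvMask_congr (s t : List Int) : ∀ (off : Nat) (l : List Int),
    (∀ j : Nat, off ≤ j → ((j : Int) ∈ s ↔ (j : Int) ∈ t)) → pvMask s off l = pvMask t off l := by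
  intro off l
  induction l generalizing off with
  | nil => intro _; rfl
  | cons x xs ih =>
    intro h
    simp only [pvMask]
    rw [ih (off + 1) (fun j hj => h j (by omega))]
    congr 1
    by_cases hm : (off : Int) ∈ s
    · rw [if_pos hm, if_pos ((h off le_rfl).1 hm)]
    · rw [if_neg hm, if_neg (fun hc => hm ((h off le_rfl).2 hc))]

lemma pvMask_set (i : Int) (s' : List Int) (hi : i ∉ s') :
    ∀ (off : Nat) (l : List Int), (off : Int) ≤ i →
    (pvMask (i :: s') off l).set (i - off).toNat 0 = pvMask s' off l := by
  intro off l
  induction l generalizing off with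
  | nil => intro _; rfl
  | cons x xs ih =>
    intro hoff
    by_cases he : (off : Int) = i
    · have h0 : (i - off).toNat = 0 := by omega
      simp only [pvMask, h0, List.set_cons_zero]
      rw [if_neg (he ▸ hi)]
      rw [pvMask_congr (i :: s') s' (off + 1) xs ?_]
      intro j hj
      constructor
      · intro hm
        rcases List.mem_cons.1 hm with hji | hm'
        · exfalso; omega
        · exact hm'
      · exact fun hm => List.mem_cons_of_mem _ hm
    · have h1 : (i - off).toNat = (i - (off + 1 : Nat)).toNat + 1 := by omega
      simp only [pvMask, h1, List.set_cons_succ]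
      rw [ih (off + 1) (by omega)]
      congr 1
      have : ((off : Int) ∈ i :: s') ↔ ((off : Int) ∈ s') := by
        simp only [List.mem_cons]
        exact ⟨fun h => h.resolve_left he, Or.inr⟩
      by_cases hm : (off : Int) ∈ s'
      · rw [if_pos (this.2 hm), if_pos hm]
      · rw [if_neg (fun hc => hm (this.1 hc)), if_neg hm]

-- max(xs) (no key) returns THE maximum value: any attained upper bound
lemma max?_id_eq (xs : List Int) (a : Int) (ha : a ∈ xs) (h : ∀ y ∈ xs, y ≤ a) :
    PySem.List.max? xs (fun y => y) = some a := by
  cases hm : PySem.List.max? xs (fun y => y) with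
  | none => rw [PySem.List.max?_eq_none_iff] at hm; simp [hm] at ha
  | some m =>
    have h1 := PySem.List.max?_mem hm
    have h2 := PySem.List.max?_isMax hm a ha
    have h3 := h m h1
    have : m = a := le_antisymm h3 h2
    rw [this]

-- index of the first occurrence, from a position all of whose predecessors differ
lemma index?_of_first (xs : List Int) (v : Int) (k : Nat) (hk : k < xs.length) (hv : xs[k] = v)
    (hfirst : ∀ m (hm : m < xs.length), m < k → xs[m] ≠ v) :
    PySem.List.index? xs v = some k := by
  rw [PySem.List.index?_eq_some_iff]
  refine ⟨xs.take k, xs.drop (k + 1), ?_, by simp [Nat.min_eq_left hk.le], ?_⟩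
  · conv_lhs => rw [← List.take_append_drop k xs, List.drop_eq_getElem_cons hk, hv]
  · intro hmem
    obtain ⟨m, hm, hmv⟩ := List.mem_take_iff_getElem.1 hmem
    exact hfirst m (by omega) (by omega) hmv

lemma length_le_of_nodup_subset (l1 l2 : List Int)
    (h1 : l1.Nodup) (h2 : l1 ⊆ l2) : l1.length ≤ l2.length :=
  calc l1.length = l1.toFinset.card := (List.toFinset_card_of_nodup h1).symm
  _ ≤ l2.toFinset.card := Finset.card_le_card (fun _ hy => List.mem_toFinset.2 (h2 (List.mem_toFinset.1 hy)))
  _ ≤ l2.length := l2.toFinset_card_le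

-- two distinct positions with the same value force count ≥ 2
lemma two_le_count_of_two_pos (xs : List Int) (m i : Nat) (hm : m < xs.length) (hi : i < xs.length)
    (hne : m < i) (h1 : xs[m] = v) (h2 : xs[i] = v) : 2 ≤ xs.count v := by
  have hs1 : [v].Sublist (xs.take (m + 1)) := by
    refine List.singleton_sublist.2 ?_
    exact List.mem_take_iff_getElem.2 ⟨m, by omega, h1⟩
  have hs2 : [v].Sublist (xs.drop (m + 1)) := by
    refine List.singleton_sublist.2 ?_
    refine List.mem_iff_getElem.2 ⟨i - (m + 1), by simp; omega, ?_⟩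
    rw [List.getElem_drop]
    have : m + 1 + (i - (m + 1)) = i := by omega
    simp_rw [this]
    exact h2
  have hs : [v, v].Sublist xs := by
    have := List.Sublist.append hs1 hs2
    rwa [List.take_append_drop] at this
  calc 2 = [v, v].count v := by simp
  _ ≤ xs.count v := List.Sublist.count_le v hs

-- B's altLoop over 'order', started at position |pre|, is the suffix scan pvBFrom
lemma altLoop_eq_pvBFrom (valueList : List Int) (order : List Int) :
    ∀ (s pre : List Int) (fuel : Nat), order = pre ++ s →
    maxSimilarIndexAltLoop valueList order pre.length fuel = pvBFrom valueList s fuel := by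
  intro s
  induction s with
  | nil =>
    intro pre fuel horder
    cases fuel with
    | zero => rfl
    | succ n =>
      rw [maxSimilarIndexAltLoop, if_pos (Or.inl (by simp [horder]))]
      rfl
  | cons i s' ih =>
    intro pre fuel horder
    cases fuel with
    | zero => rfl
    | succ n =>
      have hlen : pre.length < order.length := by simp [horder]
      have hget : PySem.List.pyGetD order (pre.length : Int) 0 = i := by
        rw [PySem.List.pyGetD_eq_getElem _ _ (by positivity) (by exact_mod_cast hlen)]
        simp only [Int.toNat_natCast, horder]
        rw [List.getElem_append_right (le_refl pre.length)]
        simp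
      rw [maxSimilarIndexAltLoop, hget, pvBFrom]
      by_cases hv : PySem.List.pyGetD valueList i 0 < 200000
      · rw [if_pos (Or.inr hv), if_pos (show pvVal valueList i < 200000 from hv)]
      · rw [if_neg (by push Not; exact ⟨by omega, not_lt.1 hv⟩),
          if_neg (show ¬ pvVal valueList i < 200000 from hv)]
        have := ih (pre ++ [i]) n (by simp [horder])
        simp only [List.length_append, List.length_cons, List.length_nil] at this
        rw [show pre.length + 1 = pre.length + (0 + 1) from rfl]
        exact congrArg (List.cons i) this

-- main simulation: A's destructive loop ≡ B's scan of the remaining argsort suffix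
lemma loop_eq_pvBFrom (valueList : List Int) (hvl : valueList ≠ []) (N : Int)
    (hnd : ¬ D_maxSimilarIndex valueList N) (ord : List Int)
    (hperm : ord.Perm (PySem.List.pyRange 0 valueList.length 1))
    (hpair : ord.Pairwise (pvR valueList)) :
    ∀ (s pre : List Int) (fuel : Nat), ord = pre ++ s → pre.length + fuel = N.toNat →
    maxSimilarIndexLoop valueList (pvMask s 0 valueList) fuel = pvBFrom valueList s fuel := by
  have hordmem : ∀ j : Int, j ∈ ord ↔ (0 ≤ j ∧ j < (valueList.length : Int)) := by
    intro j; rw [hperm.mem_iff, PySem.List.mem_pyRange_one]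
  have hnodup : ord.Nodup := hperm.nodup_iff.2 (PySem.List.nodup_pyRange_one 0 (valueList.length : Int))
  have hvcast : ∀ (k : Nat) (hkL : k < valueList.length), pvVal valueList (k : Int) = valueList[k] := by
    intro k hkL
    rw [pvVal, PySem.List.pyGetD_eq_getElem _ _ (by positivity) (by exact_mod_cast hkL)]
    simp
  intro s
  induction s with
  | nil =>
    intro pre fuel _ _
    cases fuel with
    | zero => rfl
    | succ n =>
      rw [pvBFrom, maxSimilarIndexLoop]
      cases hm : PySem.List.max? (pvMask ([] : List Int) 0 valueList) (fun y => y) with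
      | none =>
        exfalso
        apply hvl
        have := (PySem.List.max?_eq_none_iff _ _).1 hm
        have hl := length_pvMask ([] : List Int) 0 valueList
        rw [this] at hl
        exact List.eq_nil_of_length_eq_zero hl.symm
      | some m =>
        rcases mem_pvMask _ _ _ (PySem.List.max?_mem hm) with h0 | ⟨k, hk, hks, _⟩
        · dsimp only
          rw [if_pos (by rw [h0]; norm_num)]
        · simp at hks
  | cons i s' ih =>
    intro pre fuel horder hfuel
    cases fuel with
    | zero => rfl
    | succ n =>
      have hiord : i ∈ ord := horder ▸ List.mem_append.2 (Or.inr List.mem_cons_self)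
      have hi0 : 0 ≤ i := ((hordmem i).1 hiord).1
      have hiL : i < (valueList.length : Int) := ((hordmem i).1 hiord).2
      have hiLn : i.toNat < valueList.length := by omega
      set v := pvVal valueList i with hv
      have hvi : valueList[i.toNat] = v := by
        rw [hv, pvVal, PySem.List.pyGetD_eq_getElem _ _ hi0 (by exact_mod_cast hiL)]
      have hpair2 : (pre ++ i :: s').Pairwise (pvR valueList) := horder ▸ hpair
      have hpairS : (i :: s').Pairwise (pvR valueList) := (List.pairwise_append.1 hpair2).2.1
      have hubm : ∀ y ∈ pvMask (i :: s') 0 valueList, y = 0 ∨ y ≤ v := by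
        intro y hy
        rcases mem_pvMask _ _ _ hy with h0 | ⟨k, hk, hks, hky⟩
        · exact Or.inl h0
        · right
          rcases List.mem_cons.1 hks with hki | hks'
          · have hki' : k = i.toNat := by omega
            subst hki'
            exact le_of_eq (hky.trans hvi)
          · have hvk : pvVal valueList (k : Int) = valueList[k] := hvcast k hk
            rcases (List.pairwise_cons.1 hpairS).1 (k : Int) hks' with h | ⟨he, _⟩
            · rw [hky, ← hvk]; exact le_of_lt h
            · rw [hky, ← hvk, ← he]
      have hvm : v ∈ pvMask (i :: s') 0 valueList := by
        refine List.mem_iff_getElem.2 ⟨i.toNat, by rw [length_pvMask]; exact hiLn, ?_⟩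
        rw [getElem_pvMask]
        rw [if_pos (by simp [Int.toNat_of_nonneg hi0])]
        exact hvi
      rw [maxSimilarIndexLoop, pvBFrom]
      by_cases hv200 : v < 200000
      · rw [if_pos hv200]
        cases hm : PySem.List.max? (pvMask (i :: s') 0 valueList) (fun y => y) with
        | none =>
          rw [PySem.List.max?_eq_none_iff] at hm
          rw [hm] at hvm
          simp at hvm
        | some m =>
          dsimp only
          rcases hubm m (PySem.List.max?_mem hm) with rfl | hle
          · rw [if_pos (by norm_num)]
          · rw [if_pos (lt_of_le_of_lt hle hv200)]
      · rw [if_neg hv200]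
        have hvmax : PySem.List.max? (pvMask (i :: s') 0 valueList) (fun y => y) = some v :=
          max?_id_eq _ v hvm (fun y hy => (hubm y hy).elim (fun h => h ▸ (by omega : (0:Int) ≤ v)) id)
        rw [hvmax]
        dsimp only
        rw [if_neg hv200]
        have hfirst : ∀ m (hmL : m < valueList.length), m < i.toNat → valueList[m] ≠ v := by
          intro m hmL hmi hveq
          have hmord : ((m : Nat) : Int) ∈ ord := (hordmem _).2 ⟨by positivity, by exact_mod_cast hmL⟩
          have hvm2 : pvVal valueList (m : Int) = v := by rw [hvcast m hmL]; exact hveq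
          rw [horder] at hmord
          rcases List.mem_append.1 hmord with hmpre | hmcons
          · apply hnd
            refine ⟨v, hvi ▸ List.getElem_mem hiLn, not_lt.1 hv200,
              two_le_count_of_two_pos valueList m i.toNat hmL hiLn hmi hveq hvi, ?_⟩
            obtain ⟨p1, p2, hpre12⟩ := List.append_of_mem hmpre
            have hord2 : ord = p1 ++ (((m : Nat) : Int) :: (p2 ++ i :: s')) := by
              rw [horder, hpre12]; simp
            have hpair3 : (p1 ++ (((m : Nat) : Int) :: (p2 ++ i :: s'))).Pairwise (pvR valueList) :=
              hord2 ▸ hpair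
            have hafter : ∀ b ∈ p2 ++ i :: s', pvR valueList ((m : Nat) : Int) b :=
              (List.pairwise_cons.1 (List.pairwise_append.1 hpair3).2.1).1
            have hsub : (PySem.List.dedup valueList).filter (fun w => decide (v < w)) ⊆
                p1.map (pvVal valueList) := by
              intro w hw
              have hw1 : w ∈ valueList := (PySem.List.mem_dedup _ _).1 (List.mem_of_mem_filter hw)
              have hw2 : v < w := by simpa using List.of_mem_filter hw
              obtain ⟨j, hjL, hjw⟩ := List.mem_iff_getElem.1 hw1
              have hvj : pvVal valueList (j : Int) = w := by rw [hvcast j hjL]; exact hjw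
              have hjord : ((j : Nat) : Int) ∈ ord := (hordmem _).2 ⟨by positivity, by exact_mod_cast hjL⟩
              rw [hord2] at hjord
              rcases List.mem_append.1 hjord with hj1 | hj2
              · exact List.mem_map.2 ⟨_, hj1, hvj⟩
              · exfalso
                rcases List.mem_cons.1 hj2 with hjm | hj3
                · rw [hjm, hvm2] at hvj
                  omega
                · rcases hafter _ hj3 with h | ⟨he, _⟩
                  · rw [hvj, hvm2] at h; omega
                  · rw [← he, hvm2] at hvj; omega
            have hlen1 : ((PySem.List.dedup valueList).filter (fun w => decide (v < w))).length ≤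
                p1.length := by
              have hnd2 : ((PySem.List.dedup valueList).filter (fun w => decide (v < w))).Nodup :=
                (PySem.List.nodup_dedup valueList).filter _
              have := length_le_of_nodup_subset _ _ hnd2 hsub
              simpa using this
            have hplen : pre.length = p1.length + p2.length + 1 := by
              rw [hpre12]; simp; omega
            omega
          · rcases List.mem_cons.1 hmcons with hmi2 | hms'
            · omega
            · rcases (List.pairwise_cons.1 hpairS).1 _ hms' with h | ⟨_, hlt⟩
              · rw [hvm2] at h; exact absurd h (lt_irrefl v)
              · omega
        rw [index?_of_first valueList v i.toNat hiLn hvi hfirst]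
        dsimp only
        have hidup : i ∉ s' := by
          have hnds : (i :: s').Nodup :=
            ((horder ▸ hnodup : (pre ++ i :: s').Nodup).sublist (List.sublist_append_right pre _))
          exact (List.nodup_cons.1 hnds).1
        have hset := pvMask_set i s' hidup 0 valueList (by exact_mod_cast hi0)
        simp only [Nat.cast_zero, sub_zero] at hset
        rw [hset]
        have hfuel2 : (pre ++ [i]).length + n = N.toNat := by
          simp only [List.length_append, List.length_cons, List.length_nil]; omega
        rw [ih (pre ++ [i]) n (by simp [horder]) hfuel2]
        congr 1
        exact Int.toNat_of_nonneg hi0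

lemma set_eq_self_of_getElem (l : List Int) (k : Nat) (hk : k < l.length) {a : Int}
    (h : l[k] = a) : l.set k a = l := by
  apply List.ext_getElem (by simp)
  intro i h1 h2
  rw [List.getElem_set]
  split
  next he => subst he; exact h.symm
  next hne => rfl

-- a stable state of A's loop: zeroing maxIndex changes nothing, so the same index repeats
lemma loop_const (valueList temp : List Int) (v : Int) (k : Nat)
    (hv : ¬ v < 200000) (hmem : v ∈ temp) (hmax : ∀ y ∈ temp, y ≤ v)
    (hidx : PySem.List.index? valueList v = some k)
    (hset : temp.set k 0 = temp) :
    ∀ fuel, maxSimilarIndexLoop valueList temp fuel = List.replicate fuel (k : Int) := by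
  intro fuel
  induction fuel with
  | zero => rfl
  | succ n ih =>
    rw [maxSimilarIndexLoop, max?_id_eq temp v hmem hmax]
    dsimp only
    rw [if_neg hv, hidx]
    dsimp only
    rw [hset, ih, List.replicate_succ]

lemma exists_two_pos_of_two_le_count (l : List Int) (v : Int) :
    2 ≤ l.count v → ∃ (j k : Nat) (hj : j < l.length) (hk : k < l.length),
      j < k ∧ l[j] = v ∧ l[k] = v := by
  induction l with
  | nil => intro h; simp at h
  | cons x xs ih =>
    intro h
    by_cases hx : x = v
    · subst hx
      have hc : x ∈ xs := by
        rw [List.count_cons] at h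
        simp at h
        exact h
      obtain ⟨k, hk, hkv⟩ := List.mem_iff_getElem.1 hc
      exact ⟨0, k + 1, by simp, by simp; omega, by omega, by simp, by simpa using hkv⟩
    · have hc : 2 ≤ xs.count v := by
        rw [List.count_cons] at h
        simp [hx] at h
        exact h
      obtain ⟨j, k, hj, hk, hjk, h1, h2⟩ := ih hc
      exact ⟨j + 1, k + 1, by simp; omega, by simp; omega, by omega, by simpa using h1,
        by simpa using h2⟩

lemma mem_pvBFrom (valueList : List Int) : ∀ (s : List Int) (fuel : Nat) (x : Int),
    x ∈ pvBFrom valueList s fuel → x = -1 ∨ x ∈ s := by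
  intro s
  induction s with
  | nil =>
    intro fuel x hx
    cases fuel with
    | zero => simp [pvBFrom] at hx
    | succ n => simp [pvBFrom] at hx; exact Or.inl hx
  | cons i s' ih =>
    intro fuel x hx
    cases fuel with
    | zero => simp [pvBFrom] at hx
    | succ n =>
      rw [pvBFrom] at hx
      by_cases hv : pvVal valueList i < 200000
      · rw [if_pos hv] at hx
        simp at hx
        exact Or.inl hx
      · rw [if_neg hv] at hx
        rcases List.mem_cons.1 hx with rfl | hx'
        · exact Or.inr List.mem_cons_self
        · rcases ih n x hx' with h | h
          · exact Or.inl h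
          · exact Or.inr (List.mem_cons_of_mem _ h)

lemma nodup_pvBFrom (valueList : List Int) : ∀ (s : List Int) (fuel : Nat),
    s.Nodup → (∀ x ∈ s, 0 ≤ x) → (pvBFrom valueList s fuel).Nodup := by
  intro s
  induction s with
  | nil =>
    intro fuel _ _
    cases fuel with
    | zero => simp [pvBFrom]
    | succ n => simp [pvBFrom]
  | cons i s' ih =>
    intro fuel hnd hpos
    cases fuel with
    | zero => simp [pvBFrom]
    | succ n =>
      rw [pvBFrom]
      by_cases hv : pvVal valueList i < 200000
      · rw [if_pos hv]; simp
      · rw [if_neg hv]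
        refine List.nodup_cons.2 ⟨?_, ih n (List.nodup_cons.1 hnd).2
          (fun x hx => hpos x (List.mem_cons_of_mem _ hx))⟩
        intro hmem
        rcases mem_pvBFrom valueList s' n i hmem with h | h
        · have := hpos i List.mem_cons_self
          omega
        · exact (List.nodup_cons.1 hnd).1 h

-- inside D_, A's loop emits a repeated index: its output is never Nodup
lemma loop_dup (valueList : List Int) :
    ∀ (s : List Int) (fuel : Nat),
    s.Nodup → s.Pairwise (pvR valueList) →
    (∀ j ∈ s, 0 ≤ j ∧ j < (valueList.length : Int)) →
    (∃ j k : Int, j ∈ s ∧ k ∈ s ∧ j ≠ k ∧ pvVal valueList j = pvVal valueList k ∧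
      200000 ≤ pvVal valueList j ∧
      (s.filter (fun x => decide (pvVal valueList j < pvVal valueList x))).length + 2 ≤ fuel) →
    ¬ (maxSimilarIndexLoop valueList (pvMask s 0 valueList) fuel).Nodup := by
  intro s
  induction s with
  | nil =>
    rintro fuel _ _ _ ⟨j, k, hj, _⟩
    simp at hj
  | cons i s₁ ih =>
    rintro fuel hnds hpairS hrange ⟨j, k, hjmem, hkmem, hjk, hjkv, hj200, hcnt⟩
    obtain ⟨n, rfl⟩ : ∃ n, fuel = n + 1 := ⟨fuel - 1, by omega⟩
    set v := pvVal valueList i with hvdef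
    have hi0 : 0 ≤ i := (hrange i List.mem_cons_self).1
    have hiL : i < (valueList.length : Int) := (hrange i List.mem_cons_self).2
    have hiLn : i.toNat < valueList.length := by omega
    have hvi : valueList[i.toNat] = v := by
      rw [hvdef, pvVal, PySem.List.pyGetD_eq_getElem _ _ hi0 (by exact_mod_cast hiL)]
    have hvcast : ∀ (k' : Nat) (hk' : k' < valueList.length),
        pvVal valueList (k' : Int) = valueList[k'] := by
      intro k' hk'
      rw [pvVal, PySem.List.pyGetD_eq_getElem _ _ (by positivity) (by exact_mod_cast hk')]
      simp
    have hle_v : ∀ x ∈ i :: s₁, pvVal valueList x ≤ v := by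
      intro x hx
      rcases List.mem_cons.1 hx with rfl | hx'
      · exact le_refl _
      · rcases (List.pairwise_cons.1 hpairS).1 x hx' with h | ⟨he, _⟩
        · exact le_of_lt h
        · exact le_of_eq he.symm
    have hjv : pvVal valueList j ≤ v := hle_v j hjmem
    have hv200 : ¬ v < 200000 := by omega
    have hubm : ∀ y ∈ pvMask (i :: s₁) 0 valueList, y ≤ v := by
      intro y hy
      rcases mem_pvMask _ _ _ hy with h0 | ⟨k', hk', hks', hky⟩
      · omega
      · rw [hky, ← hvcast k' hk']
        exact hle_v _ hks'
    have hvm : v ∈ pvMask (i :: s₁) 0 valueList := by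
      refine List.mem_iff_getElem.2 ⟨i.toNat, by rw [length_pvMask]; exact hiLn, ?_⟩
      rw [getElem_pvMask, if_pos (by simp [Int.toNat_of_nonneg hi0])]
      exact hvi
    have hvmem : v ∈ valueList := hvi ▸ List.getElem_mem hiLn
    obtain ⟨k₀, hk₀⟩ := Option.isSome_iff_exists.1
      ((PySem.List.index?_isSome_iff valueList v).2 hvmem)
    obtain ⟨hk₀L, hk₀v, _⟩ := PySem.List.getElem_of_index?_eq_some hk₀
    by_cases hk₀s : ((k₀ : Nat) : Int) ∈ i :: s₁
    · by_cases hdup : ∃ x ∈ s₁, pvVal valueList x = v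
      · -- a second position of value v is still live: the very next state is stable on k₀
        obtain ⟨x, hxmem, hxv⟩ := hdup
        have hmaskcongr : pvMask (i :: s₁) 0 valueList =
            pvMask ((k₀ : Int) :: (i :: s₁).erase (k₀ : Int)) 0 valueList :=
          pvMask_congr _ _ 0 valueList (fun j' _ => (List.perm_cons_erase hk₀s).mem_iff)
        have hk₀ne : ((k₀ : Int)) ∉ (i :: s₁).erase (k₀ : Int) := hnds.not_mem_erase
        have hset : (pvMask (i :: s₁) 0 valueList).set k₀ 0 =
            pvMask ((i :: s₁).erase (k₀ : Int)) 0 valueList := by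
          rw [hmaskcongr]
          have := pvMask_set (k₀ : Int) _ hk₀ne 0 valueList (by positivity)
          simpa using this
        have hsurv : ∃ y, y ∈ (i :: s₁).erase (k₀ : Int) ∧ pvVal valueList y = v := by
          by_cases hik : ((k₀ : Int)) = i
          · refine ⟨x, ?_, hxv⟩
            rw [show ((k₀ : Int)) = i from hik, List.erase_cons_head]
            exact hxmem
          · refine ⟨i, ?_, hvdef.symm⟩
            exact (List.mem_erase_of_ne (fun h => hik h.symm)).2 List.mem_cons_self
        obtain ⟨y, hymem, hyv⟩ := hsurv
        have hy0 := hrange y (List.mem_of_mem_erase hymem)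
        have hyL : y.toNat < valueList.length := by omega
        have hvy : valueList[y.toNat] = v := by
          rw [← hyv, pvVal, PySem.List.pyGetD_eq_getElem _ _ hy0.1 (by exact_mod_cast hy0.2)]
        have hub2 : ∀ z ∈ pvMask ((i :: s₁).erase (k₀ : Int)) 0 valueList, z ≤ v := by
          intro z hz
          rcases mem_pvMask _ _ _ hz with h0 | ⟨k', hk', hks', hkz⟩
          · omega
          · rw [hkz, ← hvcast k' hk']
            exact hle_v _ (List.mem_of_mem_erase hks')
        have hvm2 : v ∈ pvMask ((i :: s₁).erase (k₀ : Int)) 0 valueList := by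
          refine List.mem_iff_getElem.2 ⟨y.toNat, by rw [length_pvMask]; exact hyL, ?_⟩
          rw [getElem_pvMask, if_pos (by simpa [Int.toNat_of_nonneg hy0.1] using hymem)]
          exact hvy
        have hstable : (pvMask ((i :: s₁).erase (k₀ : Int)) 0 valueList).set k₀ 0 =
            pvMask ((i :: s₁).erase (k₀ : Int)) 0 valueList := by
          apply set_eq_self_of_getElem _ k₀ (by rw [length_pvMask]; exact hk₀L)
          rw [getElem_pvMask, if_neg (by simpa using hk₀ne)]
        rw [maxSimilarIndexLoop, max?_id_eq _ v hvm hubm]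
        dsimp only
        rw [if_neg hv200, hk₀]
        dsimp only
        rw [hset, loop_const valueList _ v k₀ hv200 hvm2 hub2 hk₀ hstable n]
        intro hnd2
        exact absurd (List.nodup_cons.1 hnd2).1
          (by simp [List.mem_replicate]; omega)
      · -- v is unique among the live positions: the head is consumed, recurse on the tail
        have hk₀i : ((k₀ : Nat) : Int) = i := by
          rcases List.mem_cons.1 hk₀s with h | h
          · exact h
          · exact absurd ⟨(k₀ : Int), h, by rw [hvcast k₀ hk₀L]; exact hk₀v⟩ hdup
        have hval_j_lt : pvVal valueList j < v := by
          rcases lt_or_eq_of_le hjv with h | h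
          · exact h
          · exfalso
            rcases List.mem_cons.1 hjmem with hj1 | hj1
            · rcases List.mem_cons.1 hkmem with hk1 | hk1
              · exact hjk (hj1.trans hk1.symm)
              · exact hdup ⟨k, hk1, by rw [← hjkv, h]⟩
            · exact hdup ⟨j, hj1, h⟩
        have hjmem1 : j ∈ s₁ := by
          rcases List.mem_cons.1 hjmem with h | h
          · exact absurd (by rw [h] : pvVal valueList j = v) (ne_of_lt hval_j_lt)
          · exact h
        have hkmem1 : k ∈ s₁ := by
          rcases List.mem_cons.1 hkmem with h | h
          · exact absurd (hjkv.trans (by rw [h]) : pvVal valueList j = v) (ne_of_lt hval_j_lt)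
          · exact h
        have hfilt : ((i :: s₁).filter
              (fun x => decide (pvVal valueList j < pvVal valueList x))).length
            = (s₁.filter (fun x => decide (pvVal valueList j < pvVal valueList x))).length + 1 := by
          rw [List.filter_cons_of_pos (by simpa using hval_j_lt)]
          simp
        rw [maxSimilarIndexLoop, max?_id_eq _ v hvm hubm]
        dsimp only
        rw [if_neg hv200, hk₀]
        dsimp only
        have hsetH : (pvMask (i :: s₁) 0 valueList).set k₀ 0 = pvMask s₁ 0 valueList := by
          have hins₁ : i ∉ s₁ := (List.nodup_cons.1 hnds).1
          have h2 := pvMask_set i s₁ hins₁ 0 valueList (by exact_mod_cast hi0)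
          simp only [Nat.cast_zero, sub_zero] at h2
          rw [show k₀ = i.toNat by omega]
          exact h2
        rw [hsetH]
        intro hnd2
        refine ih n (List.nodup_cons.1 hnds).2 (List.pairwise_cons.1 hpairS).2
          (fun j' hj' => hrange j' (List.mem_cons_of_mem _ hj'))
          ⟨j, k, hjmem1, hkmem1, hjk, hjkv, hj200, by omega⟩ ?_
        exact (List.nodup_cons.1 hnd2).2
    · -- the first occurrence of the max is already zeroed: stable from the start
      have hstable : (pvMask (i :: s₁) 0 valueList).set k₀ 0 = pvMask (i :: s₁) 0 valueList := by
        apply set_eq_self_of_getElem _ k₀ (by rw [length_pvMask]; exact hk₀L)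
        rw [getElem_pvMask, if_neg (by simpa using hk₀s)]
      rw [loop_const valueList _ v k₀ hv200 hvm hubm hk₀ hstable (n + 1)]
      intro hnd2
      rw [List.nodup_replicate] at hnd2
      omega

-- ===== VERDICT (by name: the statement is the Claim_ definition above) =====
theorem maxSimilarIndex_spec : Claim_unchanged_maxSimilarIndex := by
  intro valueList N _ hpre hnd
  by_cases hvl : valueList = []
  · subst hvl
    have hN1 : ¬ 1 ≤ N := fun h => hpre ⟨rfl, h⟩
    have hN : N.toNat = 0 := by omega
    unfold maxSimilarIndex maxSimilarIndex_alt
    rw [hN]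
    rfl
  · have hperm : (PySem.List.sorted (PySem.List.pyRange 0 valueList.length 1)
        (fun i => PySem.List.pyGetD valueList i 0) true).Perm
        (PySem.List.pyRange 0 valueList.length 1) := PySem.List.sorted_perm _ _ _
    have hpair := sorted_rev_pairwise_pvR valueList (PySem.List.pyRange 0 valueList.length 1)
      (PySem.List.pairwise_lt_pyRange_one 0 valueList.length)
    have hmask : pvMask (PySem.List.sorted (PySem.List.pyRange 0 valueList.length 1)
        (fun i => PySem.List.pyGetD valueList i 0) true) 0 valueList = valueList := by
      refine pvMask_eq_self _ 0 valueList (fun j h1 h2 => ?_)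
      rw [hperm.mem_iff, PySem.List.mem_pyRange_one]
      constructor
      · positivity
      · exact_mod_cast (by omega : j < valueList.length)
    calc maxSimilarIndex valueList N
        = maxSimilarIndexLoop valueList (pvMask (PySem.List.sorted
            (PySem.List.pyRange 0 valueList.length 1)
            (fun i => PySem.List.pyGetD valueList i 0) true) 0 valueList) N.toNat := by
          rw [hmask]; rfl
      _ = pvBFrom valueList (PySem.List.sorted (PySem.List.pyRange 0 valueList.length 1)
            (fun i => PySem.List.pyGetD valueList i 0) true) N.toNat :=
          loop_eq_pvBFrom valueList hvl N hnd _ hperm hpair _ [] N.toNat rfl (by simp)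
      _ = maxSimilarIndex_alt valueList N :=
          (altLoop_eq_pvBFrom valueList _ _ [] N.toNat rfl).symm

theorem maxSimilarIndex_changed : Claim_changed_maxSimilarIndex := by
  unfold Claim_changed_maxSimilarIndex; decide

theorem maxSimilarIndex_tight : Claim_exact_maxSimilarIndex := by
  intro valueList N _ _ hd
  obtain ⟨v0, hv0mem, hv0200, hv0cnt, hv0N⟩ := hd
  have hvl : valueList ≠ [] := fun h => by simp [h] at hv0mem
  have hvcast : ∀ (k' : Nat) (hk' : k' < valueList.length),
      pvVal valueList (k' : Int) = valueList[k'] := by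
    intro k' hk'
    rw [pvVal, PySem.List.pyGetD_eq_getElem _ _ (by positivity) (by exact_mod_cast hk')]
    simp
  -- vstar: the LARGEST value that occurs at least twice and clears the threshold
  have hv0dl : v0 ∈ valueList.filter
      (fun w => decide (200000 ≤ w) && decide (2 ≤ valueList.count w)) :=
    List.mem_filter.2 ⟨hv0mem, by simp [hv0200, hv0cnt]⟩
  cases hm : PySem.List.max? (valueList.filter
      (fun w => decide (200000 ≤ w) && decide (2 ≤ valueList.count w))) (fun y => y) with
  | none =>
    rw [PySem.List.max?_eq_none_iff] at hm
    rw [hm] at hv0dl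
    simp at hv0dl
  | some vstar =>
    have hvsmem := PySem.List.max?_mem hm
    have hvsmax := PySem.List.max?_isMax hm
    have hvs1 : vstar ∈ valueList := (List.mem_filter.1 hvsmem).1
    have hvs2 : 200000 ≤ vstar ∧ 2 ≤ valueList.count vstar := by
      have := (List.mem_filter.1 hvsmem).2
      simpa using this
    have hvs_ge : v0 ≤ vstar := hvsmax v0 hv0dl
    -- the sorted index frame, as in the equality proof
    have hperm : (PySem.List.sorted (PySem.List.pyRange 0 valueList.length 1)
        (fun i => PySem.List.pyGetD valueList i 0) true).Perm
        (PySem.List.pyRange 0 valueList.length 1) := PySem.List.sorted_perm _ _ _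
    have hpair := sorted_rev_pairwise_pvR valueList (PySem.List.pyRange 0 valueList.length 1)
      (PySem.List.pairwise_lt_pyRange_one 0 valueList.length)
    set ord := PySem.List.sorted (PySem.List.pyRange 0 valueList.length 1)
      (fun i => PySem.List.pyGetD valueList i 0) true with hordd
    have hordmem : ∀ j : Int, j ∈ ord ↔ (0 ≤ j ∧ j < (valueList.length : Int)) := by
      intro j; rw [hperm.mem_iff, PySem.List.mem_pyRange_one]
    have hordnodup : ord.Nodup :=
      hperm.nodup_iff.2 (PySem.List.nodup_pyRange_one 0 (valueList.length : Int))
    have hmask : pvMask ord 0 valueList = valueList := by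
      refine pvMask_eq_self _ 0 valueList (fun j h1 h2 => ?_)
      rw [hordmem]
      exact ⟨by positivity, by exact_mod_cast (by omega : j < valueList.length)⟩
    -- two distinct live positions carrying vstar
    obtain ⟨j, k, hjL, hkL, hjk, hjv, hkv⟩ :=
      exists_two_pos_of_two_le_count valueList vstar hvs2.2
    have hjord : ((j : Nat) : Int) ∈ ord := (hordmem _).2 ⟨by positivity, by exact_mod_cast hjL⟩
    have hkord : ((k : Nat) : Int) ∈ ord := (hordmem _).2 ⟨by positivity, by exact_mod_cast hkL⟩
    have hvalj : pvVal valueList ((j : Nat) : Int) = vstar := by rw [hvcast j hjL]; exact hjv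
    have hvalk : pvVal valueList ((k : Nat) : Int) = vstar := by rw [hvcast k hkL]; exact hkv
    -- the positions above vstar are at most the distinct values above v0
    have hfb : ((ord.filter (fun x => decide (vstar < pvVal valueList x))).length : Int) + 2 ≤ N := by
      have hndF : (ord.filter (fun x => decide (vstar < pvVal valueList x))).Nodup :=
        hordnodup.filter _
      have hinj : ∀ x ∈ ord.filter (fun x => decide (vstar < pvVal valueList x)),
          ∀ y ∈ ord.filter (fun x => decide (vstar < pvVal valueList x)),
          pvVal valueList x = pvVal valueList y → x = y := by
        intro x hx y hy hxy
        by_contra hne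
        have hxo := (List.mem_filter.1 hx).1
        have hyo := (List.mem_filter.1 hy).1
        have hxgt : vstar < pvVal valueList x := by simpa using (List.mem_filter.1 hx).2
        have hx0 := ((hordmem x).1 hxo).1
        have hxL := ((hordmem x).1 hxo).2
        have hy0 := ((hordmem y).1 hyo).1
        have hyL := ((hordmem y).1 hyo).2
        have hxLn : x.toNat < valueList.length := by omega
        have hyLn : y.toNat < valueList.length := by omega
        have hgx : valueList[x.toNat] = pvVal valueList x := by
          rw [pvVal, PySem.List.pyGetD_eq_getElem _ _ hx0 (by exact_mod_cast hxL)]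
        have hgy : valueList[y.toNat] = pvVal valueList x := by
          rw [hxy, pvVal, PySem.List.pyGetD_eq_getElem _ _ hy0 (by exact_mod_cast hyL)]
        have hnexy : x.toNat ≠ y.toNat := fun h => hne (by omega)
        have hcnt2 : 2 ≤ valueList.count (pvVal valueList x) := by
          rcases Nat.lt_or_ge x.toNat y.toNat with h | h
          · exact two_le_count_of_two_pos valueList x.toNat y.toNat hxLn hyLn h hgx hgy
          · exact two_le_count_of_two_pos valueList y.toNat x.toNat hyLn hxLn
              (by omega) hgy hgx
        have hmemdl : pvVal valueList x ∈ valueList.filter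
            (fun w => decide (200000 ≤ w) && decide (2 ≤ valueList.count w)) :=
          List.mem_filter.2 ⟨hgx ▸ List.getElem_mem hxLn, by simp [hcnt2]; omega⟩
        have := hvsmax _ hmemdl
        omega
      have hndM : ((ord.filter (fun x => decide (vstar < pvVal valueList x))).map
          (pvVal valueList)).Nodup := (List.nodup_map_iff_inj_on hndF).2 hinj
      have hsubM : ((ord.filter (fun x => decide (vstar < pvVal valueList x))).map
          (pvVal valueList)) ⊆ (PySem.List.dedup valueList).filter (fun w => decide (v0 < w)) := by
        intro w hw
        obtain ⟨x, hx, hxw⟩ := List.mem_map.1 hw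
        subst hxw
        have hxo := (List.mem_filter.1 hx).1
        have hxgt : vstar < pvVal valueList x := by simpa using (List.mem_filter.1 hx).2
        have hx0 := ((hordmem x).1 hxo).1
        have hxL := ((hordmem x).1 hxo).2
        have hxLn : x.toNat < valueList.length := by omega
        have hgx : valueList[x.toNat] = pvVal valueList x := by
          rw [pvVal, PySem.List.pyGetD_eq_getElem _ _ hx0 (by exact_mod_cast hxL)]
        refine List.mem_filter.2 ⟨(PySem.List.mem_dedup _ _).2 (hgx ▸ List.getElem_mem hxLn), ?_⟩
        simp
        omega
      have hlen1 := length_le_of_nodup_subset _ _ hndM hsubM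
      have hlen2 := length_le_of_nodup_subset
        ((PySem.List.dedup valueList).filter (fun w => decide (v0 < w)))
        ((PySem.List.dedup valueList).filter (fun w => decide (v0 < w)))
        ((PySem.List.nodup_dedup valueList).filter _) (fun a ha => ha)
      have hsub3 : (PySem.List.dedup valueList).filter (fun w => decide (vstar < w)) ⊆
          (PySem.List.dedup valueList).filter (fun w => decide (v0 < w)) := by
        intro w hw
        refine List.mem_filter.2 ⟨(List.mem_filter.1 hw).1, ?_⟩
        have := (List.mem_filter.1 hw).2
        simp at this ⊢
        omega
      rw [List.length_map] at hlen1
      have hlen4 := length_le_of_nodup_subset _ _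
        (((PySem.List.nodup_dedup valueList).filter _ :
          ((PySem.List.dedup valueList).filter (fun w => decide (vstar < w))).Nodup)) hsub3
      omega
    -- assemble: A's output repeats an index, B's never does
    have hN2 : (2 : Int) ≤ N := by
      have h0 : 0 ≤ (((PySem.List.dedup valueList).filter
        (fun w => decide (v0 < w))).length : Int) := by positivity
      omega
    have hApart := loop_dup valueList ord N.toNat hordnodup hpair
      (fun j' hj' => (hordmem j').1 hj')
      ⟨((j : Nat) : Int), ((k : Nat) : Int), hjord, hkord,
        fun he => (by omega : ¬ j = k) (Nat.cast_inj.1 he), hvalj.trans hvalk.symm,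
        by rw [hvalj]; exact hvs2.1, by simp only [hvalj]; omega⟩
    intro heq
    apply hApart
    have hstep : maxSimilarIndexLoop valueList (pvMask ord 0 valueList) N.toNat =
        pvBFrom valueList ord N.toNat := by
      rw [hmask]
      calc maxSimilarIndexLoop valueList valueList N.toNat
          = maxSimilarIndex valueList N := rfl
        _ = maxSimilarIndex_alt valueList N := heq
        _ = pvBFrom valueList ord N.toNat := altLoop_eq_pvBFrom valueList _ _ [] N.toNat rfl
    rw [hstep]
    exact nodup_pvBFrom valueList ord N.toNat hordnodup
      (fun x hx => ((hordmem x).1 hx).1)
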